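-- pv_equiv track=rewrite | github.com/egort/n4dsb03 | modbus_rtu_n4dsb03_scanner.py | build_scan_order
-- ===== SOURCE A (Python) =====
-- DEFAULT_PRIORITY_SLAVES = (1, 2, 3, 4, 5, 8, 10, 16, 32, 64)
--
-- def build_scan_order(scan_from: int, scan_to: int, quick: bool) -> list[int]:
--     all_slaves = list(range(scan_from, scan_to + 1))
--     if not quick:
--         return all_slaves
--
--     ordered: list[int] = []
--     in_range_priority = [s for s in DEFAULT_PRIORITY_SLAVES if scan_from <= s <= scan_to]
--     ordered.extend(in_range_priority)
--     ordered.extend(s for s in all_slaves if s not in in_range_priority)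
--     return ordered
-- ===== SOURCE B (Python) =====
-- DEFAULT_PRIORITY_SLAVES = (1, 2, 3, 4, 5, 8, 10, 16, 32, 64)
--
--
-- def build_scan_order(scan_from: int, scan_to: int, quick: bool) -> list[int]:
--     slaves = list(range(scan_from, scan_to + 1))
--     if quick:
--         # stable sort: priority slaves (key False) first, each group keeps
--         # ascending range order; priority tuple is ascending, so this matches
--         # tuple-order extraction followed by the remaining slaves.
--         slaves.sort(key=lambda s: s not in DEFAULT_PRIORITY_SLAVES)
--     return slaves
-- ===== Notes on version B (the rewrite author's own statement) =====
-- stated objective: idiomatic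
-- what changed: Replaces A's two-stage construction (tuple-order priority comprehension plus a range filter with an O(k) inner list-membership scan, then two extends) by one stable sort of the range on the boolean key 's not in DEFAULT_PRIORITY_SLAVES', relying on the priority tuple being ascending.
import Mathlib
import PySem

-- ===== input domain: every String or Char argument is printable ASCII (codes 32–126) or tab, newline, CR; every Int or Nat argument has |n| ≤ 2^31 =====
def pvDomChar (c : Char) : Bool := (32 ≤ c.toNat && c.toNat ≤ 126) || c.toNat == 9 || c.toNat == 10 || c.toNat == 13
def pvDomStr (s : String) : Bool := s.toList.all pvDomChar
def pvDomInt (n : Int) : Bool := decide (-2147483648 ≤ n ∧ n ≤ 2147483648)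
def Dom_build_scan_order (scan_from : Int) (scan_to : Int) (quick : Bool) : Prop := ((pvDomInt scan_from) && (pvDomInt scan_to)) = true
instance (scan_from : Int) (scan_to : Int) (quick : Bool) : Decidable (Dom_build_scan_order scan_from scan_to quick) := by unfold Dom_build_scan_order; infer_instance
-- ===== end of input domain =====

-- B replaces A's two-stage construction (priority comprehension + filtered extend) by one
-- stable sort of the range on the boolean key `s not in DEFAULT_PRIORITY_SLAVES`; objective: idiomatic.

-- ===== PORT A =====
def pvDefaultPrioritySlaves : List Int := [1, 2, 3, 4, 5, 8, 10, 16, 32, 64]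

def build_scan_order (scan_from : Int) (scan_to : Int) (quick : Bool) : List Int :=
  let all_slaves := PySem.List.pyRange scan_from (scan_to + 1) 1
  if !quick then all_slaves
  else
    let in_range_priority :=
      pvDefaultPrioritySlaves.filter (fun s => decide (scan_from ≤ s) && decide (s ≤ scan_to))
    in_range_priority ++ all_slaves.filter (fun s => !(in_range_priority.contains s))

-- ===== PORT B =====
-- Python's boolean sort key `s not in DEFAULT_PRIORITY_SLAVES` (False < True) is ported as the
-- Bool key with Lean's `false < true`; `list.sort(key=…)` is PySem's stable `sorted`.
def build_scan_order_alt (scan_from : Int) (scan_to : Int) (quick : Bool) : List Int :=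
  let slaves := PySem.List.pyRange scan_from (scan_to + 1) 1
  if quick then
    PySem.List.sorted slaves (fun s => !(pvDefaultPrioritySlaves.contains s)) false
  else slaves

-- ===== PRECONDITION & SPEC =====
def Spec_build_scan_order (scan_from : Int) (scan_to : Int) (quick : Bool) (out : List Int) : Prop := out = build_scan_order_alt scan_from scan_to quick
instance (scan_from : Int) (scan_to : Int) (quick : Bool) (out : List Int) : Decidable (Spec_build_scan_order scan_from scan_to quick out) := by unfold Spec_build_scan_order; infer_instance

-- ===== CLAIM =====
def Claim_equal_build_scan_order : Prop := ∀ (scan_from : Int) (scan_to : Int) (quick : Bool), Dom_build_scan_order scan_from scan_to quick → Spec_build_scan_order scan_from scan_to quick (build_scan_order scan_from scan_to quick)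

-- ===== LEMMAS AND PROOFS =====

/-- Inserting `x` after a prefix it does not go before, and before the head of the suffix. -/
theorem pv_insertBy_append (before : Int → Int → Bool) (x b : Int) :
    ∀ (A B : List Int), (∀ a ∈ A, before x a = false) → before x b = true →
      PySem.List.insertBy before x (A ++ b :: B) = A ++ x :: b :: B := by
  intro A
  induction A with
  | nil => intro B _ hb; simp [PySem.List.insertBy, hb]
  | cons a A ih =>
    intro B hA hb
    have ha : before x a = false := hA a (by simp)
    simp only [List.cons_append, PySem.List.insertBy, ha]
    simp [ih B (fun y hy => hA y (by simp [hy])) hb]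

/-- Stable insertion of a two-valued-key list partitions it:
    the fold of `insertBy` over `xs` starting from a partitioned accumulator
    appends the `p`-elements of `xs` to the first block and the rest to the second. -/
theorem pv_foldl_insertBy_partition (p : Int → Bool) :
    ∀ (xs A B : List Int), (∀ a ∈ A, p a = true) → (∀ b ∈ B, p b = false) →
      xs.foldl
        (fun acc x =>
          PySem.List.insertBy (fun a b => decide ((!(p a)) < (!(p b)))) x acc)
        (A ++ B)
      = (A ++ xs.filter p) ++ (B ++ xs.filter (fun s => !(p s))) := by
  intro xs
  induction xs with
  | nil => intro A B _ _; simp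
  | cons x xs ih =>
    intro A B hA hB
    by_cases hx : p x = true
    · have hstep :
          PySem.List.insertBy (fun a b => decide ((!(p a)) < (!(p b)))) x (A ++ B)
            = (A ++ [x]) ++ B := by
        cases B with
        | nil =>
          rw [PySem.List.insertBy_of_forall_not_before]
          · simp
          · intro y hy
            simp only [List.append_nil] at hy
            simp [hx, hA y hy]
        | cons b B' =>
          rw [pv_insertBy_append _ x b A B' (fun a ha => by simp [hx, hA a ha])
              (by simp [hx, hB b (by simp)])]
          simp
      simp only [List.foldl_cons, hstep]
      rw [ih (A ++ [x]) B
          (by intro a ha; rcases List.mem_append.mp ha with h | h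
              · exact hA a h
              · simp only [List.mem_singleton] at h; subst h; exact hx) hB]
      simp [hx]
    · have hx' : p x = false := by simpa using hx
      have hstep :
          PySem.List.insertBy (fun a b => decide ((!(p a)) < (!(p b)))) x (A ++ B)
            = A ++ (B ++ [x]) := by
        rw [PySem.List.insertBy_of_forall_not_before]
        · simp
        · intro y _; simp [hx']
      simp only [List.foldl_cons, hstep]
      rw [ih A (B ++ [x]) hA
          (by intro b hb; rcases List.mem_append.mp hb with h | h
              · exact hB b h
              · simp only [List.mem_singleton] at h; subst h; exact hx')]
      simp [hx']

/-- Sorting by a negated-boolean key is the filter partition. -/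
theorem pv_sorted_partition (p : Int → Bool) (xs : List Int) :
    PySem.List.sorted xs (fun s => !(p s)) false
      = xs.filter p ++ xs.filter (fun s => !(p s)) := by
  rw [PySem.List.sorted_eq_foldl_insertBy]
  simpa using pv_foldl_insertBy_partition p xs [] []
    (by intro a ha; cases ha) (by intro b hb; cases hb)

/-- Two strictly increasing integer lists with the same members are equal. -/
theorem pv_sorted_lt_eq (l₁ l₂ : List Int)
    (h₁ : l₁.Pairwise (· < ·)) (h₂ : l₂.Pairwise (· < ·))
    (hm : ∀ x, x ∈ l₁ ↔ x ∈ l₂) : l₁ = l₂ := by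
  exact List.Perm.eq_of_pairwise
    (fun (a b : Int) _ _ (hab : a < b) (hba : b < a) => absurd hba (not_lt.mpr hab.le))
    h₁ h₂
    ((List.perm_ext_iff_of_nodup
        (h₁.imp fun h => ne_of_lt h) (h₂.imp fun h => ne_of_lt h)).mpr hm)

/-- The range elements lying in the priority tuple are exactly the priority
    tuple's elements lying in the range, in the same (ascending) order. -/
theorem pv_priority_filter_eq (scan_from scan_to : Int) :
    (PySem.List.pyRange scan_from (scan_to + 1) 1).filter
        (fun s => pvDefaultPrioritySlaves.contains s)
      = pvDefaultPrioritySlaves.filter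
          (fun s => decide (scan_from ≤ s) && decide (s ≤ scan_to)) := by
  apply pv_sorted_lt_eq
  · exact (PySem.List.pairwise_lt_pyRange_one _ _).filter _
  · exact List.Pairwise.filter _ (by decide : pvDefaultPrioritySlaves.Pairwise (· < ·))
  · intro x
    simp only [List.mem_filter, PySem.List.mem_pyRange_one, List.contains_iff_mem,
      decide_eq_true_eq, Bool.and_eq_true]
    constructor
    · rintro ⟨⟨h1, h2⟩, h3⟩; exact ⟨h3, h1, by omega⟩
    · rintro ⟨h3, h1, h2⟩; exact ⟨⟨h1, by omega⟩, h3⟩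

-- ===== VERDICT =====
theorem build_scan_order_spec : Claim_equal_build_scan_order := by
  intro scan_from scan_to quick _
  unfold Spec_build_scan_order build_scan_order build_scan_order_alt
  cases quick with
  | false => simp
  | true =>
    simp only [Bool.not_true, if_neg (by decide : ¬ (false = true))]
    rw [pv_sorted_partition (fun s => pvDefaultPrioritySlaves.contains s)]
    rw [pv_priority_filter_eq]
    congr 1
    rw [← pv_priority_filter_eq]
    apply List.filter_congr
    intro x hx
    have hr := (PySem.List.mem_pyRange_one).mp hx
    have hin : scan_from ≤ x ∧ x < scan_to + 1 := by omega
    by_cases h : x ∈ pvDefaultPrioritySlaves <;>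
      simp [List.mem_filter, PySem.List.mem_pyRange_one, h, hin]
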